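-- pv_equiv track=rewrite | github.com/suomela/medieval-abbreviations | visualization/visualize.py | example_counts
-- ===== SOURCE A (Python) =====
-- from collections import Counter, defaultdict
--
-- def normalize(x):
--     return x.lower().rstrip("?")
--
-- def representative(row):
--     counter = Counter()
--     for x in row:
--         x = normalize(x)
--         counter[x] += 1
--     counts = counter.most_common()
--     counts.sort(key=lambda x: (-x[1], x[0]))
--     return counts[0][0]
--
-- def example_counts(ex):
--     counter = Counter()
--     orig = defaultdict(set)
--     orig_short = defaultdict(Counter)
--     for r,short in ex:
--         rep = representative(r)
--         counter[rep] += 1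
--         for x in r:
--             orig[rep].add(x)
--         for x in short:
--             if x != "":
--                 orig_short[rep][x] += 1
--     counts = counter.most_common()
--     counts.sort(key=lambda x: (-x[1], x[0]))
--     return counts, orig, orig_short
-- ===== SOURCE B (Python) =====
-- from collections import Counter, defaultdict
--
--
-- def _normalize(x):
--     return x.lower().rstrip("?")
--
--
-- def _representative(row):
--     # Sort the normalized forms, then pick the longest run in one scan:
--     # equal forms are adjacent after sorting, and on ties the first (i.e.
--     # lexicographically smallest) run wins -- exactly the (-count, name) rule.
--     norms = sorted(_normalize(x) for x in row)
--     best = cur = norms[0]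
--     best_n = cur_n = 1
--     for x in norms[1:]:
--         if x == cur:
--             cur_n += 1
--         else:
--             cur = x
--             cur_n = 1
--         if cur_n > best_n:
--             best = cur
--             best_n = cur_n
--     return best
--
--
-- def example_counts(ex):
--     # Phase 1: tag each record with its representative and group the rows.
--     tagged = [(_representative(r), r, short) for r, short in ex]
--     groups = {}
--     for rep, r, _ in tagged:
--         groups.setdefault(rep, []).append(r)
--     # Phase 2: counts are the group sizes; orig is the union of each group.
--     counts = sorted(((rep, len(rs)) for rep, rs in groups.items()),
--                     key=lambda kv: (-kv[1], kv[0]))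
--     orig = defaultdict(set)
--     for rep, rs in groups.items():
--         orig[rep] = set().union(*rs)
--     orig_short = defaultdict(Counter)
--     for rep, _, short in tagged:
--         for x in short:
--             if x != "":
--                 orig_short[rep][x] += 1
--     return counts, orig, orig_short
-- ===== Notes on version B (the rewrite author's own statement) =====
-- stated objective: alternative
-- what changed: representative no longer builds a Counter at all: it sorts the normalized forms and picks the longest run in one linear scan (ties go to the first, i.e. smallest, run); example_counts is restructured into two phases around a grouping dict rep -> list of rows, from which counts are derived as group sizes (no increment counting) and orig as a per-group set union, with orig_short filled from the tagged records.
import Mathlib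
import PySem

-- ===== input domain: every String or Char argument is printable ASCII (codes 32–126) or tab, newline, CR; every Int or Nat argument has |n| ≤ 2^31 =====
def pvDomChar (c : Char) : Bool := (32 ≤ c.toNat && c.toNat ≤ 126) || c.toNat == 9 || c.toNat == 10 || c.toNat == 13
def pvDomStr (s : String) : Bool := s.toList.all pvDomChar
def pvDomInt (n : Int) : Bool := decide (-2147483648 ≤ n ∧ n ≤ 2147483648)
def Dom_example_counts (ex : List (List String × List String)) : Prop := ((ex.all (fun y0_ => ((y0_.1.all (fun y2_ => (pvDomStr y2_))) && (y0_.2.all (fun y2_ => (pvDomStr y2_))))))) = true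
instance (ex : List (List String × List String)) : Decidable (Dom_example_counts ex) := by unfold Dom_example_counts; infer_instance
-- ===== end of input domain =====

-- B's representative sorts the normalized forms and picks the longest run in one scan (no Counter),
-- and example_counts is restructured into two phases around a grouping dict rep -> rows, from which
-- counts are group sizes and orig per-group unions. (alternative decomposition; no speed claim.)

-- ===== PORT A =====

-- normalize: x.lower().rstrip("?"); rstrip with the one-char set "?" removes exactly the trailing
-- '?' characters, ported by hand (reverse / dropWhile / reverse) — exact on all strings.
def pvNormalize (x : String) : String :=
  String.ofList (((PySem.Str.lower x).toList.reverse.dropWhile (fun c => c == '?')).reverse)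

-- Python sort key (-count, name): tuple comparison is lexicographic
def pvKey (kv : String × Int) : Lex (Int × String) := toLex (-kv.2, kv.1)

def pvRepresentative (row : List String) : String :=
  let counter : PySem.Dict String Int :=
    row.foldl (fun d x => d.modify (pvNormalize x) 0 (· + 1)) PySem.Dict.empty
  let counts := PySem.List.sorted counter.items (fun kv => kv.2) true    -- counter.most_common()
  let counts := PySem.List.sorted counts pvKey                           -- counts.sort(key=(-cnt, name))
  (PySem.List.pyGetD counts 0 ("", 0)).1                                 -- counts[0][0]; IndexError on empty row ⇒ excluded by Pre_

def example_counts (ex : List (List String × List String)) : (List (String × Int)) × (List (String × List String)) × (List (String × List (String × Int))) :=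
  let st := ex.foldl
    (fun s p =>
      let rep := pvRepresentative p.1
      (s.1.modify rep 0 (· + 1),
       p.1.foldl (fun o x => o.modify rep [] (fun t => PySem.Set.add t x)) s.2.1,
       p.2.foldl (fun os x => if x = "" then os else os.modify rep PySem.Dict.empty (fun c => c.modify x 0 (· + 1))) s.2.2))
    ((PySem.Dict.empty : PySem.Dict String Int),
     (PySem.Dict.empty : PySem.Dict String (PySem.Set String)),
     (PySem.Dict.empty : PySem.Dict String (PySem.Dict String Int)))
  let counts := PySem.List.sorted (PySem.List.sorted st.1.items (fun kv => kv.2) true) pvKey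
  (counts, st.2.1.items, st.2.2.items.map (fun q => (q.1, q.2.items)))

-- ===== PORT B =====

-- the run scan: state (best, best_n, cur, cur_n), one step per remaining sorted element
def pvScan : List String → String → Int → String → Int → String
  | [], best, _, _, _ => best
  | x :: t, best, bn, cur, cn =>
      let cur' := if x = cur then cur else x
      let cn'  := if x = cur then cn + 1 else 1
      if bn < cn' then pvScan t cur' cn' cur' cn'
      else pvScan t best bn cur' cn'

def pvRepresentativeAlt (row : List String) : String :=
  let ns := PySem.List.sorted (row.map pvNormalize) (fun x => x)
  let b := PySem.List.pyGetD ns 0 ""                      -- norms[0]; IndexError on empty row ⇒ excluded by Pre_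
  pvScan (PySem.List.slice ns (some 1) none) b 1 b 1      -- for x in norms[1:]

def example_counts_alt (ex : List (List String × List String)) : (List (String × Int)) × (List (String × List String)) × (List (String × List (String × Int))) :=
  let tagged := ex.map (fun p => (pvRepresentativeAlt p.1, p.1, p.2))
  let groups := tagged.foldl (fun d t => d.modify t.1 [] (fun g => g ++ [t.2.1])) PySem.Dict.empty   -- groups.setdefault(rep, []).append(r)
  let counts := PySem.List.sorted (groups.items.map (fun q => (q.1, (q.2.length : Int)))) pvKey
  let orig := groups.items.foldl
    (fun d q => d.insert q.1 (q.2.foldl (fun s r => PySem.Set.update s r) []))                       -- orig[rep] = set().union(*rs)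
    (PySem.Dict.empty : PySem.Dict String (PySem.Set String))
  let origShort := tagged.foldl
    (fun d t => t.2.2.foldl (fun d x => if x = "" then d else d.modify t.1 PySem.Dict.empty (fun c => c.modify x 0 (· + 1))) d)
    (PySem.Dict.empty : PySem.Dict String (PySem.Dict String Int))
  (counts, orig.items, origShort.items.map (fun q => (q.1, q.2.items)))

-- ===== PRECONDITION & SPEC =====
-- Python A raises IndexError inside representative when some record's first list is empty; exactly those inputs are excluded.
def Pre_example_counts (ex : List (List String × List String)) : Prop := ∀ p ∈ ex, p.1 ≠ []
instance (ex : List (List String × List String)) : Decidable (Pre_example_counts ex) := by unfold Pre_example_counts; infer_instance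

def pvWitness_example_counts : (List (List String × List String)) := [(["Abc?", "abc"], ["ab", ""])]

def Spec_example_counts (ex : List (List String × List String)) (out : (List (String × Int)) × (List (String × List String)) × (List (String × List (String × Int)))) : Prop := out = example_counts_alt ex
instance (ex : List (List String × List String)) (out : (List (String × Int)) × (List (String × List String)) × (List (String × List (String × Int)))) : Decidable (Spec_example_counts ex out) := by unfold Spec_example_counts; infer_instance

-- ===== CLAIM (what is proved, stated in full; the proofs are below) =====
def Claim_equal_example_counts : Prop := ∀ (ex : List (List String × List String)), Dom_example_counts ex → Pre_example_counts ex → Spec_example_counts ex (example_counts ex)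

-- ===== LEMMAS AND PROOFS =====

lemma pvKey_injective : Function.Injective pvKey := by
  intro a b h
  have h' := congrArg (fun x => ofLex x) h
  simp [pvKey] at h'
  exact Prod.ext h'.2 (by omega)

lemma pvKey_le_iff (p q : String × Int) :
    pvKey p ≤ pvKey q ↔ q.2 < p.2 ∨ (p.2 = q.2 ∧ p.1 ≤ q.1) := by
  rw [pvKey, pvKey, Prod.Lex.toLex_le_toLex]
  constructor
  · rintro (h | ⟨h1, h2⟩)
    · exact Or.inl (by omega)
    · exact Or.inr ⟨by omega, h2⟩
  · rintro (h | ⟨h1, h2⟩)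
    · exact Or.inl (by omega)
    · exact Or.inr ⟨by omega, h2⟩

-- the first element of the key-sorted list is the key-minimum (unique, pvKey being injective)
lemma head_sorted_eq_minD (l : List (String × Int)) (d : String × Int) :
    PySem.List.pyGetD (PySem.List.sorted l pvKey) 0 d = PySem.List.minD l pvKey d := by
  cases h : PySem.List.sorted l pvKey with
  | nil =>
      have hp := (PySem.List.sorted_perm l pvKey false).symm
      rw [h] at hp
      have hl := hp.eq_nil
      subst hl
      rw [PySem.List.minD_nil, PySem.List.pyGetD_zero]
      rfl
  | cons m t =>
      have hl : l ≠ [] := by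
        intro e; subst e
        have hp := (PySem.List.sorted_perm ([] : List (String × Int)) pvKey false).eq_nil
        rw [hp] at h
        simp at h
      have hmem_m : m ∈ l := (PySem.List.mem_sorted l pvKey false m).mp (by rw [h]; exact List.mem_cons_self)
      have hminmem : PySem.List.minD l pvKey d ∈ l := PySem.List.minD_mem l pvKey d hl
      have h1 : pvKey m ≤ pvKey (PySem.List.minD l pvKey d) :=
        PySem.List.key_head_sorted_le l pvKey h _ hminmem
      have h2 : pvKey (PySem.List.minD l pvKey d) ≤ pvKey m :=
        PySem.List.min?_isMin (PySem.List.min?_eq_some_minD l pvKey d hl) m hmem_m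
      have heq : m = PySem.List.minD l pvKey d := pvKey_injective (le_antisymm h1 h2)
      rw [PySem.List.pyGetD_zero]
      simpa using heq

-- A's representative is the pvKey-minimum over Counter(norms).items()
lemma A_rep_minD (row : List String) :
    pvRepresentative row
      = (PySem.List.minD (PySem.Dict.counter (row.map pvNormalize)).items pvKey ("", 0)).1 := by
  simp only [pvRepresentative]
  rw [PySem.Dict.counter_eq_foldl, List.foldl_map,
      PySem.List.sorted_eq_sorted_of_perm _ _ pvKey pvKey_injective (PySem.List.sorted_perm _ _ true),
      head_sorted_eq_minD]

-- "v is the top form of l": member with pvKey-minimal (count, name) pair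
def pvIsTop (l : List String) (v : String) : Prop :=
  v ∈ l ∧ ∀ u ∈ l, pvKey (v, (l.count v : Int)) ≤ pvKey (u, (l.count u : Int))

lemma pvIsTop_unique {l : List String} {v w : String} (hv : pvIsTop l v) (hw : pvIsTop l w) : v = w := by
  have h1 := hv.2 w hw.1
  have h2 := hw.2 v hv.1
  have := pvKey_injective (le_antisymm h1 h2)
  exact congrArg Prod.fst this

lemma A_rep_top (row : List String) (h : row ≠ []) :
    pvIsTop (row.map pvNormalize) (pvRepresentative row) := by
  rw [A_rep_minD]
  have hitems := PySem.Dict.items_counter (row.map pvNormalize)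
  have hne : (PySem.Dict.counter (row.map pvNormalize)).items ≠ [] := by
    rw [hitems]
    rcases List.exists_mem_of_ne_nil row h with ⟨x, hx⟩
    have hx' : pvNormalize x ∈ PySem.Set.ofList (row.map pvNormalize) :=
      (PySem.Set.mem_ofList _ _).mpr (List.mem_map_of_mem hx)
    intro e
    rw [List.map_eq_nil_iff] at e
    rw [e] at hx'
    exact (List.not_mem_nil) hx' 
  set m := PySem.List.minD (PySem.Dict.counter (row.map pvNormalize)).items pvKey ("", 0) with hm
  have hmem : m ∈ (PySem.Dict.counter (row.map pvNormalize)).items :=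
    PySem.List.minD_mem _ pvKey _ hne
  have hmin := PySem.List.min?_isMin (PySem.List.min?_eq_some_minD _ pvKey ("", 0) hne)
  rw [hitems] at hmem
  rcases List.mem_map.mp hmem with ⟨k, hk, hkm⟩
  have hk1 : m.1 = k := by rw [← hkm]
  have hk2 : m.2 = ((row.map pvNormalize).count k : Int) := by rw [← hkm]
  constructor
  · rw [hk1]; exact (PySem.Set.mem_ofList _ _).mp hk
  · intro u hu
    have hu' : (u, ((row.map pvNormalize).count u : Int))
        ∈ (PySem.Dict.counter (row.map pvNormalize)).items := by
      rw [hitems]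
      exact List.mem_map_of_mem ((PySem.Set.mem_ofList _ _).mpr hu)
    have := hmin _ hu'
    have hmp : (m.1, ((row.map pvNormalize).count m.1 : Int)) = m := by
      rw [hk1, ← hk2]
      exact Prod.ext hk1.symm rfl
    rw [hmp]
    exact this

-- scan invariant
lemma pvScan_top : ∀ (t pre : List String) (best cur : String),
    (pre ++ t).Pairwise (· ≤ ·) →
    best ∈ pre → cur ∈ pre → (∀ u ∈ pre, u ≤ cur) →
    (∀ u ∈ pre, pvKey (best, (pre.count best : Int)) ≤ pvKey (u, (pre.count u : Int))) →
    pvIsTop (pre ++ t) (pvScan t best (pre.count best) cur (pre.count cur)) := by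
  intro t
  induction t with
  | nil =>
      intro pre best cur hs hb hc hmax hmin
      simpa [pvScan, pvIsTop] using ⟨hb, hmin⟩
  | cons x t ih =>
      intro pre best cur hs hb hc hmax hmin
      have hpx : ∀ u ∈ pre, u ≤ x := fun u hu =>
        (List.pairwise_append.mp hs).2.2 u hu x List.mem_cons_self
      have hs' : ((pre ++ [x]) ++ t).Pairwise (· ≤ ·) := by
        rw [List.append_assoc]; simpa using hs
      have hgoal_list : (pre ++ [x]) ++ t = pre ++ x :: t := by simp
      -- counts in the extended prefix
      have hcnt : ∀ u : String, (pre ++ [x]).count u = pre.count u + (if u = x then 1 else 0) := by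
        intro u
        rw [List.count_append]
        congr 1
        by_cases h : u = x
        · subst h; simp
        · simp [h, Ne.symm h]
      by_cases hx : x = cur
      · subst hx
        -- run continues
        by_cases hlt : (pre.count best : Int) < (pre.count x : Int) + 1
        · have hmin' : ∀ u ∈ pre ++ [x],
              pvKey (x, ((pre ++ [x]).count x : Int)) ≤ pvKey (u, ((pre ++ [x]).count u : Int)) := by
            intro u hu
            rcases List.mem_append.mp hu with hu | hu
            · by_cases hux : u = x
              · subst hux; exact le_refl _
              · have h1 := (pvKey_le_iff _ _).mp (hmin u hu)
                rw [pvKey_le_iff]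
                left
                have e1 : (pre ++ [x]).count x = pre.count x + 1 := by rw [hcnt]; simp
                have e2 : (pre ++ [x]).count u = pre.count u := by rw [hcnt]; simp [hux]
                rw [e1, e2]
                simp only at h1
                push_cast
                omega
            · simp at hu; subst hu; exact le_refl _
          have h := ih (pre ++ [x]) x x hs' (by simp) (by simp)
            (fun u hu => by rcases List.mem_append.mp hu with hu | hu
                            · exact hmax u hu
                            · simp at hu; subst hu; exact le_refl _)
            hmin'
          rw [hgoal_list] at h
          have e1 : ((pre ++ [x]).count x : Int) = (pre.count x : Int) + 1 := by
            rw [hcnt]; simp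
          rw [e1] at h
          simpa [pvScan, hlt] using h
        · -- best keeps the lead
          have hbx : best ≠ x := by
            intro e; subst e; omega
          have hmin' : ∀ u ∈ pre ++ [x],
              pvKey (best, ((pre ++ [x]).count best : Int)) ≤ pvKey (u, ((pre ++ [x]).count u : Int)) := by
            intro u hu
            have eb : (pre ++ [x]).count best = pre.count best := by rw [hcnt]; simp [hbx]
            rcases List.mem_append.mp hu with hu | hu
            · by_cases hux : u = x
              · subst hux
                have ex1 : (pre ++ [u]).count u = pre.count u + 1 := by rw [hcnt]; simp
                rw [pvKey_le_iff, eb, ex1]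
                simp only
                by_cases he : (pre.count best : Int) = (pre.count u : Int) + 1
                · right; exact ⟨by push_cast; omega, hmax best hb⟩
                · left; push_cast; omega
              · have eu : (pre ++ [x]).count u = pre.count u := by rw [hcnt]; simp [hux]
                rw [eb, eu]; exact hmin u hu
            · simp at hu; subst hu
              have ex1 : (pre ++ [u]).count u = pre.count u + 1 := by rw [hcnt]; simp
              rw [pvKey_le_iff, eb, ex1]
              simp only
              by_cases he : (pre.count best : Int) = (pre.count u : Int) + 1
              · right; exact ⟨by push_cast; omega, hmax best hb⟩
              · left; push_cast; omega
          have h := ih (pre ++ [x]) best x hs' (by simp [hb]) (by simp)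
            (fun u hu => by rcases List.mem_append.mp hu with hu | hu
                            · exact hmax u hu
                            · simp at hu; subst hu; exact le_refl _)
            hmin'
          rw [hgoal_list] at h
          have e1 : ((pre ++ [x]).count x : Int) = (pre.count x : Int) + 1 := by rw [hcnt]; simp
          have e2 : ((pre ++ [x]).count best : Int) = (pre.count best : Int) := by
            rw [hcnt]; simp [hbx]
          rw [e1, e2] at h
          simpa [pvScan, hlt] using h
      · -- new run of length 1
        have hxpre : x ∉ pre := by
          intro hxm
          exact hx (le_antisymm (hmax x hxm) ((List.pairwise_append.mp hs).2.2 cur hc x List.mem_cons_self))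
        have hb1 : 1 ≤ pre.count best := List.one_le_count_iff.mpr hb
        have hnlt : ¬ ((pre.count best : Int) < 1) := by omega
        have excnt : (pre ++ [x]).count x = 1 := by
          rw [hcnt]; simp [List.count_eq_zero.mpr hxpre]
        have hmin' : ∀ u ∈ pre ++ [x],
            pvKey (best, ((pre ++ [x]).count best : Int)) ≤ pvKey (u, ((pre ++ [x]).count u : Int)) := by
          intro u hu
          have hbx : best ≠ x := fun e => hxpre (e ▸ hb)
          have eb : (pre ++ [x]).count best = pre.count best := by rw [hcnt]; simp [hbx]
          rcases List.mem_append.mp hu with hu | hu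
          · have hux : u ≠ x := fun e => hxpre (e ▸ hu)
            have eu : (pre ++ [x]).count u = pre.count u := by rw [hcnt]; simp [hux]
            rw [eb, eu]; exact hmin u hu
          · simp at hu; subst hu
            rw [pvKey_le_iff, eb, excnt]
            simp only
            by_cases he : pre.count best = 1
            · right; exact ⟨by rw [he], hpx best hb⟩
            · left; push_cast; omega
        have h := ih (pre ++ [x]) best x hs' (by simp [hb]) (by simp)
          (fun u hu => by rcases List.mem_append.mp hu with hu | hu
                          · exact hpx u hu
                          · simp at hu; subst hu; exact le_refl _)
          hmin'
        rw [hgoal_list] at h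
        have e1 : ((pre ++ [x]).count x : Int) = 1 := by rw [excnt]; rfl
        have e2 : ((pre ++ [x]).count best : Int) = (pre.count best : Int) := by
          have hbx : best ≠ x := fun e => hxpre (e ▸ hb)
          rw [hcnt]; simp [hbx]
        rw [e1, e2] at h
        simpa [pvScan, hx, hnlt] using h

lemma pvIsTop_perm {l l' : List String} {v : String} (hp : l.Perm l') (h : pvIsTop l v) : pvIsTop l' v := by
  refine ⟨hp.subset h.1, fun u hu => ?_⟩
  rw [← hp.count_eq, ← hp.count_eq]
  exact h.2 u (hp.symm.subset hu)

lemma B_rep_top (row : List String) (h : row ≠ []) :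
    pvIsTop (row.map pvNormalize) (pvRepresentativeAlt row) := by
  have hperm : (PySem.List.sorted (row.map pvNormalize) (fun x => x) false).Perm (row.map pvNormalize) :=
    PySem.List.sorted_perm _ _ false
  refine pvIsTop_perm hperm ?_
  have hne : PySem.List.sorted (row.map pvNormalize) (fun x => x) false ≠ [] := by
    rw [Ne, PySem.List.sorted_eq_nil_iff]
    simpa using h
  rw [pvRepresentativeAlt]
  cases hns : PySem.List.sorted (row.map pvNormalize) (fun x => x) false with
  | nil => exact absurd hns hne
  | cons b t =>
      have hpw : (b :: t).Pairwise (· ≤ ·) := by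
        have := PySem.List.sorted_pairwise (row.map pvNormalize) (fun x => x)
        rw [hns] at this
        exact this
      have h1 : PySem.List.pyGetD (b :: t) 0 "" = b := PySem.List.pyGetD_zero_cons b t ""
      have h2 : PySem.List.slice (b :: t) (some 1) none = t := by
        rw [PySem.List.slice_from_one]; rfl
      simp only [h1, h2]
      have := pvScan_top t [b] b b (by simpa using hpw) (by simp) (by simp)
        (by intro u hu; simp at hu; subst hu; exact le_refl _)
        (by intro u hu; simp at hu; subst hu; exact le_refl _)
      simpa using this

lemma rep_eq (row : List String) (h : row ≠ []) :
    pvRepresentative row = pvRepresentativeAlt row :=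
  pvIsTop_unique (A_rep_top row h) (B_rep_top row h)

-- A's loop carries three independently-updated accumulators: it is three loops
lemma foldA_split (ex : List (List String × List String))
    (c : PySem.Dict String Int) (o : PySem.Dict String (PySem.Set String))
    (os : PySem.Dict String (PySem.Dict String Int)) :
    ex.foldl
      (fun s p =>
        let rep := pvRepresentative p.1
        (s.1.modify rep 0 (· + 1),
         p.1.foldl (fun o x => o.modify rep [] (fun t => PySem.Set.add t x)) s.2.1,
         p.2.foldl (fun os x => if x = "" then os else os.modify rep PySem.Dict.empty (fun c => c.modify x 0 (· + 1))) s.2.2))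
      (c, o, os)
    = (ex.foldl (fun c p => c.modify (pvRepresentative p.1) 0 (· + 1)) c,
       ex.foldl (fun o p => p.1.foldl (fun o x => o.modify (pvRepresentative p.1) [] (fun t => PySem.Set.add t x)) o) o,
       ex.foldl (fun os p => p.2.foldl (fun os x => if x = "" then os else os.modify (pvRepresentative p.1) PySem.Dict.empty (fun c => c.modify x 0 (· + 1))) os) os) := by
  induction ex generalizing c o os with
  | nil => rfl
  | cons p t ih => simp only [List.foldl_cons]; exact ih _ _ _

-- repeated 'orig[rep].add(x)' at one key composes into a single modify at that key
lemma modify_modify_self {ν : Type} (d : PySem.Dict String ν) (k : String) (dflt : ν) (f g : ν → ν) :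
    (d.modify k dflt f).modify k dflt g = d.modify k dflt (fun v => g (f v)) := by
  simp [PySem.Dict.modify, PySem.Dict.getD_insert_self, PySem.Dict.insert_insert_self]

lemma foldl_modify_acc {ν α : Type} (k : String) (dflt : ν) (step : ν → α → ν) :
    ∀ (xs : List α) (d : PySem.Dict String ν) (g : ν → ν),
      xs.foldl (fun o x => o.modify k dflt (fun t => step t x)) (d.modify k dflt g)
        = d.modify k dflt (fun v => xs.foldl step (g v)) := by
  intro xs
  induction xs with
  | nil => intro d g; rfl
  | cons x t ih =>
      intro d g
      simp only [List.foldl_cons]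
      rw [modify_modify_self]
      exact ih d (fun v => step (g v) x)

-- A's inner 'for x in r: orig[rep].add(x)' equals a single 'update' modify on a nonempty r
lemma add_loop_eq_update (k : String) (xs : List String) (hx : xs ≠ [])
    (acc : PySem.Dict String (PySem.Set String)) :
    xs.foldl (fun o x => o.modify k [] (fun t => PySem.Set.add t x)) acc
      = acc.modify k [] (fun t => PySem.Set.update t xs) := by
  cases xs with
  | nil => exact absurd rfl hx
  | cons x t =>
      show t.foldl _ (acc.modify k [] (fun v => PySem.Set.add v x)) = _
      rw [foldl_modify_acc]
      rfl

-- keyed grouping lemma: a modify-fold read back at one key is the fold of that key's values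
lemma getD_foldl_modify_key {ν α β : Type} (key : β → String) (val : β → α) (d0 : ν) (g : ν → α → ν) :
    ∀ (l : List β) (d : PySem.Dict String ν) (k : String),
      (l.foldl (fun d b => d.modify (key b) d0 (fun v => g v (val b))) d).getD k d0
        = ((l.filter (fun b => key b == k)).map val).foldl g (d.getD k d0) := by
  intro l
  induction l with
  | nil => intro d k; rfl
  | cons b t ih =>
      intro d k
      simp only [List.foldl_cons, List.filter_cons]
      by_cases hk : key b = k
      · subst hk
        simp only [beq_self_eq_true, if_pos, List.map_cons, List.foldl_cons]
        rw [ih, PySem.Dict.getD_modify_self]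
      · rw [ih]
        have hb : (key b == k) = false := by simp [hk]
        simp only [hb, Bool.false_eq_true, if_neg, not_false_iff]
        rw [PySem.Dict.getD_modify, if_neg (fun h => hk h.symm)]

lemma groups_nodup_keys (ex : List (List String × List String)) :
    (ex.foldl (fun d p => d.modify (pvRepresentativeAlt p.1) [] (fun g => g ++ [p.1])) PySem.Dict.empty).keys.Nodup := by
  exact PySem.Dict.nodup_keys_foldl_modify_key ex (fun p => pvRepresentativeAlt p.1) []
    (fun d p => fun g => g ++ [p.1]) PySem.Dict.empty (by simp)

-- items of the grouping dict: first-occurrence keys, each with its rows in order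
lemma groups_items (ex : List (List String × List String)) :
    (ex.foldl (fun d p => d.modify (pvRepresentativeAlt p.1) [] (fun g => g ++ [p.1])) PySem.Dict.empty).items
      = (PySem.Set.ofList (ex.map (fun p => pvRepresentativeAlt p.1))).map
          (fun k => (k, (ex.filter (fun p => pvRepresentativeAlt p.1 == k)).map (fun p => p.1))) := by
  have hnd := groups_nodup_keys ex
  rw [PySem.Dict.items_eq_map_keys _ hnd ([] : List (List String))]
  have hkeys : (ex.foldl (fun d p => d.modify (pvRepresentativeAlt p.1) [] (fun g => g ++ [p.1])) PySem.Dict.empty).keys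
      = PySem.Set.ofList (ex.map (fun p => pvRepresentativeAlt p.1)) := by
    rw [PySem.Dict.keys_foldl_modify_key]
    simp [PySem.Set.update_nil_left]
  rw [hkeys]
  refine List.map_congr_left ?_
  intro k hk
  refine congrArg (fun v => (k, v)) ?_
  have h := getD_foldl_modify_key (fun p : List String × List String => pvRepresentativeAlt p.1)
    (fun p => p.1) ([] : List (List String)) (fun v a => v ++ [a]) ex PySem.Dict.empty k
  rw [PySem.List.foldl_append_singleton] at h
  simpa [PySem.Dict.getD_empty] using h



theorem example_counts_eq (ex : List (List String × List String))
    (hpre : Pre_example_counts ex) :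
    example_counts ex = example_counts_alt ex := by
  have hrep : ∀ p ∈ ex, pvRepresentative p.1 = pvRepresentativeAlt p.1 :=
    fun p hp => rep_eq p.1 (hpre p hp)
  simp only [example_counts, example_counts_alt]
  rw [foldA_split]
  simp only []
  have e1 : ex.foldl (fun c p => c.modify (pvRepresentative p.1) 0 (· + 1)) (PySem.Dict.empty : PySem.Dict String Int)
      = ex.foldl (fun c p => c.modify (pvRepresentativeAlt p.1) 0 (· + 1)) PySem.Dict.empty :=
    PySem.List.foldl_congr_mem _ _ _ _ (fun acc p hp => by rw [hrep p hp])
  have e2 : ex.foldl (fun o p => p.1.foldl (fun o x => o.modify (pvRepresentative p.1) [] (fun t => PySem.Set.add t x)) o) (PySem.Dict.empty : PySem.Dict String (PySem.Set String))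
      = ex.foldl (fun o p => o.modify (pvRepresentativeAlt p.1) [] (fun t => PySem.Set.update t p.1)) PySem.Dict.empty :=
    PySem.List.foldl_congr_mem _ _ _ _
      (fun acc p hp => by rw [hrep p hp]; exact add_loop_eq_update _ _ (hpre p hp) acc)
  have e3 : ex.foldl (fun os p => p.2.foldl (fun os x => if x = "" then os else os.modify (pvRepresentative p.1) PySem.Dict.empty (fun c => c.modify x 0 (· + 1))) os) (PySem.Dict.empty : PySem.Dict String (PySem.Dict String Int))
      = ex.foldl (fun os p => p.2.foldl (fun os x => if x = "" then os else os.modify (pvRepresentativeAlt p.1) PySem.Dict.empty (fun c => c.modify x 0 (· + 1))) os) PySem.Dict.empty :=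
    PySem.List.foldl_congr_mem _ _ _ _ (fun acc p hp => by rw [hrep p hp])
  simp only [List.foldl_map]
  refine congrArg₂ Prod.mk ?_ (congrArg₂ Prod.mk ?_ ?_)
  · -- counts
    rw [e1, PySem.List.sorted_eq_sorted_of_perm _ _ pvKey pvKey_injective (PySem.List.sorted_perm _ _ true)]
    have hAc : ex.foldl (fun c p => c.modify (pvRepresentativeAlt p.1) 0 (· + 1)) (PySem.Dict.empty : PySem.Dict String Int)
        = PySem.Dict.counter (ex.map (fun p => pvRepresentativeAlt p.1)) := by
      rw [PySem.Dict.counter_eq_foldl, List.foldl_map]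
    rw [hAc, PySem.Dict.items_counter, groups_items, List.map_map]
    refine congrArg (fun l => PySem.List.sorted l pvKey) ?_
    refine List.map_congr_left ?_
    intro k hk
    refine congrArg (fun v => (k, v)) ?_
    refine congrArg Int.ofNat ?_
    simp only [List.count, List.countP_map, List.length_map]
    rw [← List.countP_eq_length_filter]
    rfl
  · -- orig
    rw [e2]
    have hndA : (ex.foldl (fun o p => o.modify (pvRepresentativeAlt p.1) [] (fun t => PySem.Set.update t p.1)) (PySem.Dict.empty : PySem.Dict String (PySem.Set String))).keys.Nodup :=
      PySem.Dict.nodup_keys_foldl_modify_key ex (fun p => pvRepresentativeAlt p.1) []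
        (fun d p => fun t => PySem.Set.update t p.1) PySem.Dict.empty (by simp)
    rw [PySem.Dict.items_eq_map_keys _ hndA ([] : PySem.Set String)]
    have hkeysA : (ex.foldl (fun o p => o.modify (pvRepresentativeAlt p.1) [] (fun t => PySem.Set.update t p.1)) (PySem.Dict.empty : PySem.Dict String (PySem.Set String))).keys
        = PySem.Set.ofList (ex.map (fun p => pvRepresentativeAlt p.1)) := by
      rw [PySem.Dict.keys_foldl_modify_key]
      simp [PySem.Set.update_nil_left]
    rw [hkeysA]
    have hB := PySem.Dict.items_foldl_insert_fresh
      (l := (ex.foldl (fun d p => d.modify (pvRepresentativeAlt p.1) [] (fun g => g ++ [p.1])) PySem.Dict.empty).items)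
      (k := fun q : String × List (List String) => q.1)
      (v := fun q : String × List (List String) => q.2.foldl (fun s r => PySem.Set.update s r) [])
      (d := (PySem.Dict.empty : PySem.Dict String (PySem.Set String)))
      (by intro a ha; simp)
      (by
        have : ((ex.foldl (fun d p => d.modify (pvRepresentativeAlt p.1) [] (fun g => g ++ [p.1])) PySem.Dict.empty).items.map (fun q : String × List (List String) => q.1))
            = (ex.foldl (fun d p => d.modify (pvRepresentativeAlt p.1) [] (fun g => g ++ [p.1])) PySem.Dict.empty).keys := rfl
        rw [this]
        exact groups_nodup_keys ex)
    rw [hB]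
    rw [groups_items, List.map_map]
    have hemp : (PySem.Dict.empty : PySem.Dict String (PySem.Set String)).items = [] := rfl
    rw [hemp, List.nil_append]
    refine List.map_congr_left ?_
    intro k hk
    refine congrArg (fun v => (k, v)) ?_
    have h := getD_foldl_modify_key (fun p : List String × List String => pvRepresentativeAlt p.1)
      (fun p => p.1) ([] : PySem.Set String) (fun v a => PySem.Set.update v a) ex PySem.Dict.empty k
    simpa [PySem.Dict.getD_empty] using h
  · -- orig_short
    rw [e3]

-- ===== VERDICT (by name: the statement is the Claim_ definition above) =====
theorem example_counts_spec : Claim_equal_example_counts := by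
  intro ex _ hpre
  unfold Spec_example_counts
  exact example_counts_eq ex hpre
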